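-- pv_equiv track=rewrite | github.com/dataRpyth/python | franchise_pricing_v1-master/common/util/utils.py | get_hash_code
-- ===== SOURCE A (Python) =====
-- def get_hash_code(st):
--
--     def convert_n_bytes(n, b):
--         bits = b * 8
--         return (n + 2 ** (bits - 1)) % 2 ** bits - 2 ** (bits - 1)
--
--     def convert_4_bytes(n):
--         return convert_n_bytes(n, 4)
--
--     def hash_code(s):
--         h = 0
--         n = len(s)
--         for i, c in enumerate(s):
--             h = h + ord(c) * 31 ** (n - 1 - i)
--         return convert_4_bytes(h)
--
--     return hash_code(st)
-- ===== SOURCE B (Python) =====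
-- def get_hash_code(st):
--     # Horner's rule with 32-bit masking at each step: O(n) small-int work
--     # instead of A's per-character big-int powers of 31.
--     h = 0
--     for c in st:
--         h = (h * 31 + ord(c)) & 0xFFFFFFFF
--     return h - 0x100000000 if h >= 0x80000000 else h
-- ===== Notes on version B (the rewrite author's own statement) =====
-- stated objective: faster
-- what changed: Replaces the per-character computation of 31**(n-1-i) on unbounded integers by Horner's rule h = (h*31 + ord(c)) mod 2^32, keeping every intermediate value below 2^32 and folding to a signed 4-byte value at the end.
import Mathlib
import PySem

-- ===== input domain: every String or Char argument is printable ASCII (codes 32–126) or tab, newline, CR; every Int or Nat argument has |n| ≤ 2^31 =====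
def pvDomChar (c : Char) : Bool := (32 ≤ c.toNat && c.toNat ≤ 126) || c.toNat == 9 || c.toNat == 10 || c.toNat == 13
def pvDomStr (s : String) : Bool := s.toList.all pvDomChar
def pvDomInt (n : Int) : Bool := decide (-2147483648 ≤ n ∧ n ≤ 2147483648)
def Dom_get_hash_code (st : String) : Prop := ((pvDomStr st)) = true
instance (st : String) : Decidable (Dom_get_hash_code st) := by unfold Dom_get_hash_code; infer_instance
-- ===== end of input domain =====

-- B replaces A's per-character big-int powers 31**(n-1-i) by Horner's rule with
-- 32-bit masking at each step (objective: faster, asymptotic).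


-- ===== PORT A =====
-- '2 ** (bits - 1)' / '2 ** bits': exponents are 31 and 32 here (nonnegative), so '.toNat' is exact.
def pvConvertNBytes (n b : Int) : Int :=
  let bits := b * 8
  PySem.Int.mod (n + 2 ^ (bits - 1).toNat) (2 ^ bits.toNat) - 2 ^ (bits - 1).toNat

def pvConvert4Bytes (n : Int) : Int := pvConvertNBytes n 4

-- 'ord(c)' = (c.toNat : Int); '31 ** (n - 1 - i)': the exponent is ≥ 0 for every index
-- produced by enumerate, so '.toNat' is exact.
def get_hash_code (st : String) : Int :=
  let s := st.toList
  let n : Int := PySem.Str.len st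
  let h : Int := (PySem.List.enumerate s).foldl
    (fun h p => h + (p.2.toNat : Int) * 31 ^ (n - 1 - p.1).toNat) 0
  pvConvert4Bytes h

-- ===== PORT B =====
def get_hash_code_alt (st : String) : Int :=
  let h : Int := st.toList.foldl
    (fun h c => PySem.Int.band (h * 31 + (c.toNat : Int)) 0xFFFFFFFF) 0
  if h ≥ 0x80000000 then h - 0x100000000 else h

-- ===== PRECONDITION & SPEC =====
def Spec_get_hash_code (st : String) (out : Int) : Prop := out = get_hash_code_alt st
instance (st : String) (out : Int) : Decidable (Spec_get_hash_code st out) := by unfold Spec_get_hash_code; infer_instance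

-- ===== CLAIM (what is proved, stated in full; the proofs are below) =====
def Claim_equal_get_hash_code : Prop := ∀ (st : String), Dom_get_hash_code st → Spec_get_hash_code st (get_hash_code st)

-- ===== LEMMAS AND PROOFS =====

-- Plain (unmasked) Horner fold.
def pvHorner (a : Int) (l : List Char) : Int :=
  l.foldl (fun h c => h * 31 + (c.toNat : Int)) a

theorem pvHorner_shift (l : List Char) : ∀ a : Int,
    pvHorner a l = a * 31 ^ l.length + pvHorner 0 l := by
  induction l with
  | nil => intro a; simp [pvHorner]
  | cons c l ih =>
      intro a
      have h1 : pvHorner a (c :: l) = pvHorner (a * 31 + (c.toNat : Int)) l := rfl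
      have h2 : pvHorner 0 (c :: l) = pvHorner ((0:Int) * 31 + (c.toNat : Int)) l := rfl
      rw [h1, h2, ih (a * 31 + (c.toNat : Int)), ih ((0:Int) * 31 + (c.toNat : Int)), List.length_cons, pow_succ]
      ring

-- A's enumerate-fold with total length m computes the Horner value.
theorem pvAfold_eq_horner (m : Nat) (l : List Char) : ∀ (k : Nat) (a : Int),
    k + l.length = m →
    (PySem.List.enumerate l (k : Int)).foldl
      (fun h p => h + (p.2.toNat : Int) * 31 ^ ((m : Int) - 1 - p.1).toNat) a
      = a + pvHorner 0 l := by
  induction l with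
  | nil => intro k a _; simp [PySem.List.enumerate_nil, pvHorner]
  | cons c l ih =>
      intro k a hk
      rw [PySem.List.enumerate_cons]
      show List.foldl _ (a + (c.toNat : Int) * 31 ^ ((m : Int) - 1 - (k : Int)).toNat) _ = _
      have hcast : ((k : Int) + 1) = (((k + 1 : Nat)) : Int) := by push_cast; ring
      have hexp : ((m : Int) - 1 - (k : Int)).toNat = l.length := by
        simp at hk; omega
      rw [hcast, ih (k + 1) _ (by simp at hk ⊢; omega), hexp]
      have : pvHorner 0 (c :: l) = (c.toNat : Int) * 31 ^ l.length + pvHorner 0 l := by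
        show pvHorner ((0:Int) * 31 + (c.toNat : Int)) l = _
        rw [pvHorner_shift]; ring
      rw [this]; ring

-- The mask '& 0xFFFFFFFF' is reduction mod 2^32 for nonnegative inputs.
theorem pvBand_mask (a : Int) (ha : 0 ≤ a) :
    PySem.Int.band a 0xFFFFFFFF = a % 4294967296 := by
  rw [PySem.Int.band_of_nonneg ha (by norm_num)]
  have h1 : (0xFFFFFFFF : Int).toNat = 2 ^ 32 - 1 := by decide
  have h2 : a.toNat &&& (2 ^ 32 - 1) = a.toNat % 2 ^ 32 := Nat.and_two_pow_sub_one_eq_mod a.toNat 32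
  rw [h1, h2]
  omega

-- Horner mod M only depends on the accumulator mod M.
theorem pvHorner_modeq (l : List Char) : ∀ x y : Int,
    x ≡ y [ZMOD 4294967296] → pvHorner x l ≡ pvHorner y l [ZMOD 4294967296] := by
  induction l with
  | nil => intro x y h; exact h
  | cons c l ih =>
      intro x y h
      exact ih _ _ (Int.ModEq.add_right _ (Int.ModEq.mul_right 31 h))

-- The masked fold computes Horner mod 2^32.
theorem pvMasked_eq (l : List Char) : ∀ a : Int, 0 ≤ a → a < 4294967296 →
    l.foldl (fun h c => PySem.Int.band (h * 31 + (c.toNat : Int)) 0xFFFFFFFF) a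
      = pvHorner a l % 4294967296 := by
  induction l with
  | nil =>
      intro a h0 h1
      simp [pvHorner]
      omega
  | cons c l ih =>
      intro a h0 h1
      show List.foldl _ (PySem.Int.band (a * 31 + (c.toNat : Int)) 0xFFFFFFFF) l = _
      have hnn : (0:Int) ≤ a * 31 + (c.toNat : Int) := by positivity
      rw [pvBand_mask _ hnn]
      rw [ih _ (Int.emod_nonneg _ (by norm_num)) (Int.emod_lt_of_pos _ (by norm_num))]
      have : pvHorner ((a * 31 + (c.toNat : Int)) % 4294967296) l
            ≡ pvHorner (a * 31 + (c.toNat : Int)) l [ZMOD 4294967296] :=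
        pvHorner_modeq l _ _ (Int.emod_emod_of_dvd _ dvd_rfl)
      exact this

theorem pv_main (st : String) : get_hash_code st = get_hash_code_alt st := by
  unfold get_hash_code get_hash_code_alt pvConvert4Bytes pvConvertNBytes
  simp only [PySem.Str.len_eq]
  have hA := pvAfold_eq_horner st.toList.length st.toList 0 0 (by simp)
  have hcast0 : ((0:Nat) : Int) = (0:Int) := by norm_num
  rw [hcast0] at hA
  rw [hA]
  have hB := pvMasked_eq st.toList 0 (by norm_num) (by norm_num)
  rw [hB]
  rw [PySem.Int.mod_eq_emod_of_pos (by norm_num)]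
  have e1 : ((4 * 8 - 1 : Int)).toNat = 31 := by decide
  have e2 : ((4 * 8 : Int)).toNat = 32 := by decide
  rw [e1, e2]
  norm_num
  split_ifs with h
  · omega
  · omega

-- ===== VERDICT (by name: the statement is the Claim_ definition above) =====
theorem get_hash_code_spec : Claim_equal_get_hash_code := by
  intro st _
  unfold Spec_get_hash_code
  exact pv_main st
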